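-- pv_equiv track=rewrite | github.com/Dean998/chuck-norris-jokes | main.py | transform_to_meow_norris
-- ===== SOURCE A (Python) =====
-- def transform_to_meow_norris(joke_text: str, mascot: str = "Meow Norris") -> str:
--     """Transform Chuck Norris jokes to use our pet mascot"""
--     if not joke_text:
--         return joke_text
--
--     # Replace all variations of Chuck Norris
--     replacements = [
--         ("Chuck Norris", mascot),
--         ("chuck norris", mascot.lower()),
--         ("CHUCK NORRIS", mascot.upper()),
--     ]
--
--     transformed = joke_text
--     for old, new in replacements:
--         transformed = transformed.replace(old, new)
--
--     return transformed
-- ===== SOURCE B (Python) =====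
-- def transform_to_meow_norris(joke_text: str, mascot: str = "Meow Norris") -> str:
--     """Transform Chuck Norris jokes to use our pet mascot (single left-to-right scan)."""
--     if not joke_text:
--         return joke_text
--
--     variants = ("Chuck Norris", "chuck norris", "CHUCK NORRIS")
--     repl = {
--         "Chuck Norris": mascot,
--         "chuck norris": mascot.lower(),
--         "CHUCK NORRIS": mascot.upper(),
--     }
--
--     out = []
--     i = 0
--     n = len(joke_text)
--     while i < n:
--         for old in variants:
--             if joke_text.startswith(old, i):
--                 out.append(repl[old])
--                 i += len(old)
--                 break
--         else:
--             out.append(joke_text[i])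
--             i += 1
--     return "".join(out)
-- ===== Notes on version B (the rewrite author's own statement) =====
-- stated objective: alternative
-- what changed: A runs three separate full-string .replace passes (one per case variant); B makes a single left-to-right scan that at each position dispatches on whichever variant starts there and jumps past the match.
-- outside the precondition, e.g. on transform_to_meow_norris('chuck Chuck Norrisnorris', ''): A returns '', B returns 'chuck norris'
import Mathlib
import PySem

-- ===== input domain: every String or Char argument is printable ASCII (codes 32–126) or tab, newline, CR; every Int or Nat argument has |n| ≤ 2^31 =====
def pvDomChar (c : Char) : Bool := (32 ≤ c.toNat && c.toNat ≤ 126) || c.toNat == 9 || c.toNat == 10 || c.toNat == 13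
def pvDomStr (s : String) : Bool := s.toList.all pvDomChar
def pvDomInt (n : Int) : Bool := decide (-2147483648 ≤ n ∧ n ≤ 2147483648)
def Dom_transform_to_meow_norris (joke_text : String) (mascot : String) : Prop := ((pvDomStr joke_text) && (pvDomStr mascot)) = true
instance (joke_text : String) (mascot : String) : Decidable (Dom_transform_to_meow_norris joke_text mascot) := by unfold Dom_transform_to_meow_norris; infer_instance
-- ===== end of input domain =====

-- B replaces A's three sequential full-string `.replace` passes by ONE left-to-right scan
-- that dispatches on whichever variant starts at the current position (objective: alternative).

-- ===== PORT A =====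
-- A: build the replacements list, then fold `.replace` over it.
def transform_to_meow_norris (joke_text : String) (mascot : String) : String :=
  if joke_text = "" then joke_text
  else
    let replacements : List (String × String) :=
      [("Chuck Norris", mascot),
       ("chuck norris", PySem.Str.lower mascot),
       ("CHUCK NORRIS", PySem.Str.upper mascot)]
    replacements.foldl (fun transformed p => PySem.Str.replace transformed p.1 p.2) joke_text

-- ===== PORT B =====
-- the three variant patterns of Source B (each 12 characters, nonempty)
def pvPat1 : List Char := "Chuck Norris".toList
def pvPat2 : List Char := "chuck norris".toList
def pvPat3 : List Char := "CHUCK NORRIS".toList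

-- B's while loop: at each position try the three variants in order (startswith),
-- emit the matching replacement and jump past the match, else emit one character.
def pvScanB (r1 r2 r3 : List Char) : List Char → List Char
  | [] => []
  | c :: t =>
    if pvPat1.isPrefixOf (c :: t) then r1 ++ pvScanB r1 r2 r3 (t.drop (pvPat1.length - 1))
    else if pvPat2.isPrefixOf (c :: t) then r2 ++ pvScanB r1 r2 r3 (t.drop (pvPat2.length - 1))
    else if pvPat3.isPrefixOf (c :: t) then r3 ++ pvScanB r1 r2 r3 (t.drop (pvPat3.length - 1))
    else c :: pvScanB r1 r2 r3 t
  termination_by l => l.length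
  decreasing_by all_goals (simp; try omega)

def transform_to_meow_norris_alt (joke_text : String) (mascot : String) : String :=
  if joke_text = "" then joke_text
  else
    String.ofList
      (pvScanB mascot.toList (PySem.Chars.lower mascot.toList) (PySem.Chars.upper mascot.toList)
        joke_text.toList)

-- ===== PRECONDITION & SPEC =====
-- `pvSafe P r`: no nonempty suffix of the replacement r dovetails with the pattern P
-- (is a prefix of P, or starts with P), and no nonempty suffix of P dovetails with r.
def pvSafe (P r : List Char) : Bool :=
  ((List.range r.length).all fun k =>
      !((r.drop k).isPrefixOf P) && !(P.isPrefixOf (r.drop k))) &&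
  ((List.range P.length).all fun j =>
      !((P.drop j).isPrefixOf r) && !(r.isPrefixOf (P.drop j)))

-- Pre_ excludes inputs where A's later passes can re-match text produced by an earlier pass
-- (a cascading artefact of A's pass ordering, on which A's and B's answers are both defensible):
-- it admits every joke_text containing no variant at all, and otherwise requires that the
-- mascot (and its lowercase form) cannot dovetail with the lowercase/uppercase variants.
def Pre_transform_to_meow_norris (joke_text : String) (mascot : String) : Prop :=
  (pvSafe pvPat2 mascot.toList = true ∧ pvSafe pvPat3 mascot.toList = true
      ∧ pvSafe pvPat3 (PySem.Chars.lower mascot.toList) = true)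
  ∨ (PySem.Str.isIn "Chuck Norris" joke_text = false
      ∧ PySem.Str.isIn "chuck norris" joke_text = false
      ∧ PySem.Str.isIn "CHUCK NORRIS" joke_text = false)
instance (joke_text : String) (mascot : String) : Decidable (Pre_transform_to_meow_norris joke_text mascot) := by
  unfold Pre_transform_to_meow_norris; infer_instance

def pvWitness_transform_to_meow_norris : String × String := ("Chuck Norris rocks", "Meow Norris")

def Spec_transform_to_meow_norris (joke_text : String) (mascot : String) (out : String) : Prop := out = transform_to_meow_norris_alt joke_text mascot
instance (joke_text : String) (mascot : String) (out : String) : Decidable (Spec_transform_to_meow_norris joke_text mascot out) := by unfold Spec_transform_to_meow_norris; infer_instance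

-- ===== CLAIM (what is proved, stated in full; the proofs are below) =====
def Claim_equal_transform_to_meow_norris : Prop := ∀ (joke_text : String) (mascot : String), Dom_transform_to_meow_norris joke_text mascot → Pre_transform_to_meow_norris joke_text mascot → Spec_transform_to_meow_norris joke_text mascot (transform_to_meow_norris joke_text mascot)

-- ===== LEMMAS AND PROOFS =====

-- structural form of one `.replace` pass (first match wins, the scan jumps past it)
def pvScanP (old new : List Char) : List Char → List Char
  | [] => []
  | c :: t =>
    if old.isPrefixOf (c :: t) then new ++ pvScanP old new (t.drop (old.length - 1))
    else c :: pvScanP old new t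
  termination_by l => l.length
  decreasing_by all_goals (simp; try omega)

lemma pvGo_eq_scanP (old new : List Char) (hold : old ≠ []) :
    ∀ fuel l acc, l.length ≤ fuel →
      PySem.Chars.replace.go old new fuel l acc = acc.reverse ++ pvScanP old new l := by
  intro fuel
  induction fuel with
  | zero =>
    intro l acc h
    have : l = [] := List.eq_nil_of_length_eq_zero (Nat.le_zero.mp h)
    subst this
    simp [PySem.Chars.replace.go, pvScanP]
  | succ fuel ih =>
    intro l acc h
    match l with
    | [] => simp [PySem.Chars.replace.go, pvScanP]
    | c :: t =>
      rw [PySem.Chars.replace.go]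
      by_cases hp : old.isPrefixOf (c :: t)
      · rw [if_pos hp]
        have hlen : 1 ≤ old.length := by
          cases old with
          | nil => exact absurd rfl hold
          | cons _ _ => simp
        have hdrop : (c :: t).drop old.length = t.drop (old.length - 1) := by
          obtain ⟨k, hk⟩ : ∃ k, old.length = k + 1 := ⟨old.length - 1, by omega⟩
          rw [hk]; simp
        rw [hdrop]
        rw [ih (t.drop (old.length - 1)) (new.reverse ++ acc) (by simp at h ⊢; omega)]
        rw [pvScanP, if_pos hp]
        simp
      · rw [if_neg hp]
        rw [ih t (c :: acc) (by simp at h ⊢; omega)]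
        rw [pvScanP, if_neg hp]
        simp

lemma pvReplace_eq_scanP (s old new : List Char) (hold : old ≠ []) :
    PySem.Chars.replace s old new = pvScanP old new s := by
  rw [PySem.Chars.replace]
  rw [if_neg (by simpa using hold)]
  simpa using pvGo_eq_scanP old new hold s.length s [] le_rfl

-- a prefix of `a ++ v` is comparable with `a`
lemma pvPrefix_append_cases {P a v : List Char} (h : P <+: a ++ v) :
    a <+: P ∨ P <+: a := by
  obtain ⟨t, ht⟩ := h
  by_cases hle : a.length ≤ P.length
  · left
    have h1 : List.take a.length (P ++ t) = a := by rw [ht, List.take_left]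
    rw [List.take_append_of_le_length hle] at h1
    rw [← h1]; exact List.take_prefix _ _
  · right
    have h1 : List.take P.length (a ++ v) = P := by rw [← ht, List.take_left]
    rw [List.take_append_of_le_length (by omega)] at h1
    rw [← h1]; exact List.take_prefix _ _

lemma pvSafe_spec {P r : List Char} (h : pvSafe P r = true) :
    (∀ k < r.length, ¬ (r.drop k <+: P) ∧ ¬ (P <+: r.drop k)) ∧
    (∀ j < P.length, ¬ (P.drop j <+: r) ∧ ¬ (r <+: P.drop j)) := by
  unfold pvSafe at h
  simp only [Bool.and_eq_true, List.all_eq_true, List.mem_range] at h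
  constructor
  · intro k hk
    have h' := h.1 k hk
    simp only [Bool.not_eq_true'] at h'
    refine ⟨fun hc => ?_, fun hc => ?_⟩
    · rw [(List.isPrefixOf_iff_prefix).mpr hc] at h'; exact absurd h'.1 (by simp)
    · rw [(List.isPrefixOf_iff_prefix).mpr hc] at h'; exact absurd h'.2 (by simp)
  · intro j hj
    have h' := h.2 j hj
    simp only [Bool.not_eq_true'] at h'
    refine ⟨fun hc => ?_, fun hc => ?_⟩
    · rw [(List.isPrefixOf_iff_prefix).mpr hc] at h'; exact absurd h'.1 (by simp)
    · rw [(List.isPrefixOf_iff_prefix).mpr hc] at h'; exact absurd h'.2 (by simp)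

-- no occurrence of P can start inside the block r (nor span out of it)
lemma pvNo_match_in_block {P r : List Char} (h : pvSafe P r = true) (v : List Char) :
    ∀ k < r.length, ¬ P <+: (r.drop k ++ v) := by
  intro k hk hpre
  rcases pvPrefix_append_cases hpre with hc | hc
  · exact ((pvSafe_spec h).1 k hk).1 hc
  · exact ((pvSafe_spec h).1 k hk).2 hc

-- a scan passes over a block in which its pattern cannot match
lemma pvScanP_append (old new : List Char) (u v : List Char)
    (h : ∀ k < u.length, ¬ old <+: (u.drop k ++ v)) :
    pvScanP old new (u ++ v) = u ++ pvScanP old new v := by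
  induction u with
  | nil => simp
  | cons c u ih =>
    have h0 : ¬ old.isPrefixOf (c :: (u ++ v)) := by
      intro hc
      exact h 0 (by simp) (by simpa using (List.isPrefixOf_iff_prefix).mp hc)
    rw [List.cons_append, pvScanP, if_neg h0]
    rw [ih (fun k hk => by simpa using h (k + 1) (by simp; omega))]
    simp

-- a later pass cannot create a new occurrence: any suffix of the pattern Q that is a
-- prefix of the scanned output was already a prefix of the input
lemma pvNoNew (P r Q : List Char) (hs : pvSafe Q r = true) :
    ∀ n u, u.length ≤ n → ∀ j, Q.drop j <+: pvScanP P r u → Q.drop j <+: u := by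
  intro n
  induction n with
  | zero =>
    intro u hu j h
    have : u = [] := List.eq_nil_of_length_eq_zero (Nat.le_zero.mp hu)
    subst this
    rw [pvScanP] at h
    rw [List.prefix_nil.mp h]
  | succ n ih =>
    intro u hu j h
    match u with
    | [] =>
      rw [pvScanP] at h
      rw [List.prefix_nil.mp h]
    | c :: t =>
      by_cases hj : j < Q.length
      · by_cases hp : P.isPrefixOf (c :: t)
        · rw [pvScanP, if_pos hp] at h
          rcases pvPrefix_append_cases h with hc | hc
          · exact absurd hc ((pvSafe_spec hs).2 j hj).2
          · exact absurd hc ((pvSafe_spec hs).2 j hj).1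
        · rw [pvScanP, if_neg hp] at h
          rw [List.drop_eq_getElem_cons hj] at h ⊢
          rw [List.cons_prefix_cons] at h ⊢
          exact ⟨h.1, ih t (by simp at hu; omega) (j + 1) h.2⟩
      · have he : Q.drop j = [] := List.drop_eq_nil_of_le (by omega)
        rw [he]; exact List.nil_prefix
  
lemma pvNoNew_top (P r Q : List Char) (hs : pvSafe Q r = true)
    (u : List Char) (h : Q <+: pvScanP P r u) : Q <+: u := by
  have := pvNoNew P r Q hs u.length u le_rfl 0 (by simpa using h)
  simpa using this

-- pairwise non-overlap of the three patterns, in pvSafe form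
lemma pvSafe_12 : pvSafe pvPat1 pvPat2 = true := by decide
lemma pvSafe_13 : pvSafe pvPat1 pvPat3 = true := by decide
lemma pvSafe_23 : pvSafe pvPat2 pvPat3 = true := by decide

lemma pvPat1_ne : pvPat1 ≠ [] := by decide
lemma pvPat2_ne : pvPat2 ≠ [] := by decide
lemma pvPat3_ne : pvPat3 ≠ [] := by decide

-- scanning straight over a foreign pattern block
lemma pvScanP_over (old new blk v : List Char) (h : pvSafe old blk = true) :
    pvScanP old new (blk ++ v) = blk ++ pvScanP old new v :=
  pvScanP_append old new blk v (pvNo_match_in_block h v)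

-- the scan at a position where its own pattern matches
lemma pvScanP_match (old new t : List Char) (hold : old ≠ []) :
    pvScanP old new (old ++ t) = new ++ pvScanP old new t := by
  match old with
  | oc :: ot =>
    rw [List.cons_append, pvScanP,
      if_pos ((List.isPrefixOf_iff_prefix).mpr (by exact ⟨t, by simp⟩))]
    congr 2
    simp

lemma pvDrop_of_prefix (Pp t' : List Char) (c : Char) (t : List Char)
    (hP : Pp ≠ []) (ht' : Pp ++ t' = c :: t) :
    t.drop (Pp.length - 1) = t' := by
  have h1 := congrArg (List.drop Pp.length) ht'
  rw [List.drop_left] at h1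
  rw [h1]
  obtain ⟨k, hk⟩ : ∃ k, Pp.length = k + 1 := by
    cases Pp with
    | nil => exact absurd rfl hP
    | cons _ _ => exact ⟨_, rfl⟩
  rw [hk]
  simp

-- the fused single scan equals the three sequential scans, by strong induction on length
lemma pvMain (r1 r2 r3 : List Char)
    (h21 : pvSafe pvPat2 r1 = true) (h31 : pvSafe pvPat3 r1 = true)
    (h32 : pvSafe pvPat3 r2 = true) :
    ∀ n s, s.length ≤ n →
      pvScanP pvPat3 r3 (pvScanP pvPat2 r2 (pvScanP pvPat1 r1 s)) = pvScanB r1 r2 r3 s := by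
  intro n
  induction n with
  | zero =>
    intro s h
    have : s = [] := List.eq_nil_of_length_eq_zero (Nat.le_zero.mp h)
    subst this
    simp [pvScanP, pvScanB]
  | succ n ih =>
    intro s hlen
    match s with
    | [] => simp [pvScanP, pvScanB]
    | c :: t =>
      by_cases h1 : pvPat1 <+: (c :: t)
      · obtain ⟨t', ht'⟩ := h1
        have hrec : pvScanP pvPat3 r3 (pvScanP pvPat2 r2 (pvScanP pvPat1 r1 t')) = pvScanB r1 r2 r3 t' := by
          apply ih
          have hl := congrArg List.length ht'
          simp [pvPat1] at hl
          simp at hlen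
          omega
        rw [← ht', pvScanP_match pvPat1 r1 t' pvPat1_ne,
          pvScanP_over pvPat2 r2 r1 _ h21, pvScanP_over pvPat3 r3 r1 _ h31, hrec]
        rw [ht', pvScanB, if_pos ((List.isPrefixOf_iff_prefix).mpr ⟨t', ht'⟩)]
        rw [pvDrop_of_prefix pvPat1 t' c t pvPat1_ne ht']
      · by_cases h2 : pvPat2 <+: (c :: t)
        · obtain ⟨t', ht'⟩ := h2
          have hrec : pvScanP pvPat3 r3 (pvScanP pvPat2 r2 (pvScanP pvPat1 r1 t')) = pvScanB r1 r2 r3 t' := by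
            apply ih
            have hl := congrArg List.length ht'
            simp [pvPat2] at hl
            simp at hlen
            omega
          rw [← ht', pvScanP_over pvPat1 r1 pvPat2 _ pvSafe_12,
            pvScanP_match pvPat2 r2 _ pvPat2_ne,
            pvScanP_over pvPat3 r3 r2 _ h32, hrec]
          rw [ht', pvScanB]
          rw [if_neg (fun hc => h1 ((List.isPrefixOf_iff_prefix).mp hc))]
          rw [if_pos ((List.isPrefixOf_iff_prefix).mpr ⟨t', ht'⟩)]
          rw [pvDrop_of_prefix pvPat2 t' c t pvPat2_ne ht']
        · by_cases h3 : pvPat3 <+: (c :: t)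
          · obtain ⟨t', ht'⟩ := h3
            have hrec : pvScanP pvPat3 r3 (pvScanP pvPat2 r2 (pvScanP pvPat1 r1 t')) = pvScanB r1 r2 r3 t' := by
              apply ih
              have hl := congrArg List.length ht'
              simp [pvPat3] at hl
              simp at hlen
              omega
            rw [← ht', pvScanP_over pvPat1 r1 pvPat3 _ pvSafe_13,
              pvScanP_over pvPat2 r2 pvPat3 _ pvSafe_23,
              pvScanP_match pvPat3 r3 _ pvPat3_ne, hrec]
            rw [ht', pvScanB]
            rw [if_neg (fun hc => h1 ((List.isPrefixOf_iff_prefix).mp hc))]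
            rw [if_neg (fun hc => h2 ((List.isPrefixOf_iff_prefix).mp hc))]
            rw [if_pos ((List.isPrefixOf_iff_prefix).mpr ⟨t', ht'⟩)]
            rw [pvDrop_of_prefix pvPat3 t' c t pvPat3_ne ht']
          · -- no variant matches at the head
            have e1 : pvScanP pvPat1 r1 (c :: t) = c :: pvScanP pvPat1 r1 t := by
              rw [pvScanP, if_neg (fun hc => h1 ((List.isPrefixOf_iff_prefix).mp hc))]
            have hno2 : ¬ pvPat2 <+: pvScanP pvPat1 r1 (c :: t) := fun hc =>
              h2 (pvNoNew_top pvPat1 r1 pvPat2 h21 _ hc)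
            have hno3 : ¬ pvPat3 <+: pvScanP pvPat2 r2 (pvScanP pvPat1 r1 (c :: t)) := fun hc =>
              h3 (pvNoNew_top pvPat1 r1 pvPat3 h31 _
                (pvNoNew_top pvPat2 r2 pvPat3 h32 _ hc))
            rw [e1] at hno2
            have e2 : pvScanP pvPat2 r2 (c :: pvScanP pvPat1 r1 t)
                = c :: pvScanP pvPat2 r2 (pvScanP pvPat1 r1 t) := by
              rw [pvScanP, if_neg (fun hc => hno2 ((List.isPrefixOf_iff_prefix).mp hc))]
            rw [e1, e2] at hno3
            have e3 : pvScanP pvPat3 r3 (c :: pvScanP pvPat2 r2 (pvScanP pvPat1 r1 t))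
                = c :: pvScanP pvPat3 r3 (pvScanP pvPat2 r2 (pvScanP pvPat1 r1 t)) := by
              rw [pvScanP, if_neg (fun hc => hno3 ((List.isPrefixOf_iff_prefix).mp hc))]
            rw [e1, e2, e3, ih t (by simp at hlen; omega)]
            rw [pvScanB]
            rw [if_neg (fun hc => h1 ((List.isPrefixOf_iff_prefix).mp hc))]
            rw [if_neg (fun hc => h2 ((List.isPrefixOf_iff_prefix).mp hc))]
            rw [if_neg (fun hc => h3 ((List.isPrefixOf_iff_prefix).mp hc))]

-- identity scans when the pattern does not occur at all
lemma pvScanP_id (old new s : List Char) (h : ¬ old <:+: s) :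
    pvScanP old new s = s := by
  induction s with
  | nil => simp [pvScanP]
  | cons c t ih =>
    rw [pvScanP, if_neg (fun hc => h (((List.isPrefixOf_iff_prefix).mp hc).isInfix))]
    rw [ih (fun hc => h (List.infix_cons hc))]

lemma pvScanB_id (r1 r2 r3 s : List Char)
    (h1 : ¬ pvPat1 <:+: s) (h2 : ¬ pvPat2 <:+: s) (h3 : ¬ pvPat3 <:+: s) :
    pvScanB r1 r2 r3 s = s := by
  induction s with
  | nil => simp [pvScanB]
  | cons c t ih =>
    rw [pvScanB]
    rw [if_neg (fun hc => h1 (((List.isPrefixOf_iff_prefix).mp hc).isInfix))]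
    rw [if_neg (fun hc => h2 (((List.isPrefixOf_iff_prefix).mp hc).isInfix))]
    rw [if_neg (fun hc => h3 (((List.isPrefixOf_iff_prefix).mp hc).isInfix))]
    rw [ih (fun hc => h1 (List.infix_cons hc)) (fun hc => h2 (List.infix_cons hc))
          (fun hc => h3 (List.infix_cons hc))]

-- ===== VERDICT (by name: the statement is the Claim_ definition above) =====
theorem transform_to_meow_norris_spec : Claim_equal_transform_to_meow_norris := by
  intro joke_text mascot _hdom hpre
  unfold Spec_transform_to_meow_norris
  unfold transform_to_meow_norris transform_to_meow_norris_alt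
  by_cases hempty : joke_text = ""
  · simp [hempty]
  · rw [if_neg hempty, if_neg hempty]
    simp only [List.foldl]
    unfold PySem.Str.replace
    simp only [String.toList_ofList, PySem.Str.toList_lower, PySem.Str.toList_upper]
    congr 1
    have e1 : "Chuck Norris".toList = pvPat1 := rfl
    have e2 : "chuck norris".toList = pvPat2 := rfl
    have e3 : "CHUCK NORRIS".toList = pvPat3 := rfl
    rw [e1, e2, e3]
    rw [pvReplace_eq_scanP _ _ _ pvPat1_ne, pvReplace_eq_scanP _ _ _ pvPat2_ne,
      pvReplace_eq_scanP _ _ _ pvPat3_ne]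
    rcases hpre with ⟨h21, h31, h32⟩ | ⟨n1, n2, n3⟩
    · exact pvMain _ _ _ h21 h31 h32 joke_text.toList.length joke_text.toList le_rfl
    · have m1 : ¬ pvPat1 <:+: joke_text.toList := by
        rw [← e1]; exact (PySem.Chars.isIn_eq_false_iff _ _).mp (by simpa using n1)
      have m2 : ¬ pvPat2 <:+: joke_text.toList := by
        rw [← e2]; exact (PySem.Chars.isIn_eq_false_iff _ _).mp (by simpa using n2)
      have m3 : ¬ pvPat3 <:+: joke_text.toList := by
        rw [← e3]; exact (PySem.Chars.isIn_eq_false_iff _ _).mp (by simpa using n3)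
      rw [pvScanP_id _ _ _ m1, pvScanP_id _ _ _ m2, pvScanP_id _ _ _ m3,
        pvScanB_id _ _ _ _ m1 m2 m3]
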